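-- pv_equiv track=rewrite | github.com/pypi-data/pypi-mirror-398 | packages/mdit-py-heading-attrs/mdit_py_heading_attrs-1.0.0-py3-none-any.whl/mdit_py_heading_attrs/attribute_parser.py | find_last_unescaped_brace
-- ===== SOURCE A (Python) =====
-- def find_last_unescaped_brace(text: str) -> int:
--     """Find the last '{' that is not escaped with backslash.
--
--     Args:
--         text: The text to search
--
--     Returns:
--         Position of last unescaped '{', or -1 if not found
--
--     Examples:
--         >>> find_last_unescaped_brace("Hello {#id}")
--         6
--         >>> find_last_unescaped_brace("Hello \\{not}")
--         -1
--         >>> find_last_unescaped_brace("Text \\{escaped} {#id}")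
--         17
--     """
--     pos = len(text) - 1
--
--     while pos >= 0:
--         if text[pos] == "{":
--             # Check if escaped (preceded by odd number of backslashes)
--             num_backslashes = 0
--             check_pos = pos - 1
--             while check_pos >= 0 and text[check_pos] == "\\":
--                 num_backslashes += 1
--                 check_pos -= 1
--
--             # If even number of backslashes (including 0), the brace is not escaped
--             if num_backslashes % 2 == 0:
--                 return pos
--
--             # Odd number of backslashes means it's escaped, skip past the backslashes
--             pos = check_pos
--         else:
--             pos -= 1
--
--     return -1
-- ===== SOURCE B (Python) =====
-- def find_last_unescaped_brace(text: str) -> int: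
--     """Find the last '{' that is not escaped with backslash (single forward pass)."""
--     escaped = False
--     result = -1
--     for i, ch in enumerate(text):
--         if escaped:
--             escaped = False
--         elif ch == "\\":
--             escaped = True
--         elif ch == "{":
--             result = i
--     return result
-- ===== Notes on version B (the rewrite author's own statement) =====
-- stated objective: simpler
-- what changed: Replaced the backward scan with an inner backslash-counting loop by a single forward pass maintaining an escaped flag and the last unescaped-brace index.
import Mathlib
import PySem

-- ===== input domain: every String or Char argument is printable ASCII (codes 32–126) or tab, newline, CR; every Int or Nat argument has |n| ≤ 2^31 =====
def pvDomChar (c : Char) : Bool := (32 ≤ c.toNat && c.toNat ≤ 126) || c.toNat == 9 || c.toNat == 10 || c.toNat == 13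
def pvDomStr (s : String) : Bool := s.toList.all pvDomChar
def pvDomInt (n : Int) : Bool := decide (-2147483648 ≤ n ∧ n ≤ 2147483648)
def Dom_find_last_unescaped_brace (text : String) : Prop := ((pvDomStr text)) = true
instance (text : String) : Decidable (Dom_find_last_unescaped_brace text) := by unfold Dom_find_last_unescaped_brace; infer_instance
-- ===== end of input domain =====

-- Header: B replaces A's backward scan with inner backslash-counting loop by a single
-- forward pass with an escaped flag (objective: simpler).

-- ===== PORT A =====
-- inner while loop of A: number of consecutive backslashes ending just below position p
-- (argument is check_pos + 1, so 0 encodes check_pos < 0)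
def aCount (cs : List Char) : Nat → Nat
  | 0 => 0
  | p + 1 => if cs[p]? = some '\\' then aCount cs p + 1 else 0

-- outer while loop of A; argument is pos + 1 (0 encodes pos < 0)
def aLoop (cs : List Char) : Nat → Int
  | 0 => -1
  | p + 1 =>
    if cs[p]? = some '{' then
      let nb := aCount cs p
      if nb % 2 = 0 then (p : Int)
      else aLoop cs (p - nb)      -- pos = check_pos, i.e. argument (pos - nb)
    else aLoop cs p
termination_by p => p
decreasing_by
  · omega
  · omega

def find_last_unescaped_brace (text : String) : Int :=
  aLoop text.toList text.toList.length

-- ===== PORT B =====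
-- one step of B's for-loop: state = (escaped, result), input = (char, index)
def bStep (st : Bool × Int) (ci : Char × Nat) : Bool × Int :=
  if st.1 then (false, st.2)
  else if ci.1 = '\\' then (true, st.2)
  else if ci.1 = '{' then (false, (ci.2 : Int))
  else (false, st.2)

def find_last_unescaped_brace_alt (text : String) : Int :=
  (text.toList.zipIdx.foldl bStep (false, -1)).2

-- ===== PRECONDITION & SPEC =====
def Spec_find_last_unescaped_brace (text : String) (out : Int) : Prop := out = find_last_unescaped_brace_alt text
instance (text : String) (out : Int) : Decidable (Spec_find_last_unescaped_brace text out) := by unfold Spec_find_last_unescaped_brace; infer_instance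

-- ===== CLAIM (what is proved, stated in full; the proofs are below) =====
def Claim_equal_find_last_unescaped_brace : Prop := ∀ (text : String), Dom_find_last_unescaped_brace text → Spec_find_last_unescaped_brace text (find_last_unescaped_brace text)

-- ===== LEMMAS AND PROOFS =====

theorem aCount_le (cs : List Char) : ∀ p, aCount cs p ≤ p := by
  intro p
  induction p with
  | zero => simp [aCount]
  | succ n ih => simp only [aCount]; split <;> omega

theorem aCount_append (cs : List Char) (c : Char) :
    ∀ p, p ≤ cs.length → aCount (cs ++ [c]) p = aCount cs p := by
  intro p
  induction p with
  | zero => intro _; rfl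
  | succ n ih =>
    intro h
    have hg : (cs ++ [c])[n]? = cs[n]? := List.getElem?_append_left (by omega)
    simp only [aCount, hg]
    split <;> simp [ih (by omega)]

theorem aLoop_append (cs : List Char) (c : Char) :
    ∀ p, p ≤ cs.length → aLoop (cs ++ [c]) p = aLoop cs p := by
  intro p
  induction p using Nat.strong_induction_on with
  | _ p ih =>
    match p with
    | 0 => intro _; simp [aLoop]
    | n + 1 =>
      intro h
      have hg : (cs ++ [c])[n]? = cs[n]? := List.getElem?_append_left (by omega)
      have hc := aCount_append cs c n (by omega)
      have hle := aCount_le cs n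
      simp only [aLoop, hg, hc]
      split
      · split
        · rfl
        · exact ih (n - aCount cs n) (by omega) (by omega)
      · exact ih n (by omega) (by omega)

theorem aLoop_skip (cs : List Char) : ∀ p, aLoop cs p = aLoop cs (p - aCount cs p) := by
  intro p
  induction p using Nat.strong_induction_on with
  | _ p ih =>
    match p with
    | 0 => rfl
    | n + 1 =>
      by_cases hb : cs[n]? = some '\\'
      · have hcount : aCount cs (n + 1) = aCount cs n + 1 := by simp [aCount, hb]
        have hbrace : ¬ (cs[n]? = some '{') := by rw [hb]; simp
        have hstep : aLoop cs (n + 1) = aLoop cs n := by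
          simp only [aLoop]; rw [if_neg hbrace]
        have hle := aCount_le cs n
        rw [hstep, hcount, ih n (by omega)]
        congr 1
        omega
      · have hcount : aCount cs (n + 1) = 0 := by simp [aCount, hb]
        rw [hcount]
        simp

-- B's fold over cs computes (whether the trailing backslash run of cs is odd, A's answer on cs)
theorem bFold_eq (cs : List Char) :
    cs.zipIdx.foldl bStep (false, -1)
      = (decide (aCount cs cs.length % 2 = 1), aLoop cs cs.length) := by
  induction cs using List.reverseRecOn with
  | nil => simp [aLoop, aCount]
  | append_singleton cs c ih =>
    have hlen : (cs ++ [c]).length = cs.length + 1 := by simp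
    have hg : (cs ++ [c])[cs.length]? = some c := List.getElem?_concat_length
    have hcnt : aCount (cs ++ [c]) cs.length = aCount cs cs.length :=
      aCount_append cs c cs.length le_rfl
    have hle := aCount_le cs cs.length
    rw [List.zipIdx_append, List.foldl_append, ih]
    simp only [List.zipIdx, List.foldl, hlen, Nat.zero_add]
    simp only [aCount, aLoop, hg, hcnt]
    by_cases hodd : aCount cs cs.length % 2 = 1
    · -- escaped state
      simp only [bStep, hodd, decide_true, if_true]
      by_cases hc : c = '{'
      · simp only [hc, if_true, reduceCtorEq]
        rw [aLoop_append cs '{' (cs.length - aCount cs cs.length) (by omega),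
            ← aLoop_skip cs cs.length]
        have hcb : ¬ ('{' = '\\') := by decide
        simp [hcb]
      · have hsome : ¬ (some c = some '{') := by simpa using hc
        rw [if_neg hsome, aLoop_append cs c cs.length le_rfl]
        by_cases hbs : c = '\\'
        · simp [hbs]
          omega
        · simp [hbs]
    · have heven : aCount cs cs.length % 2 = 0 := by omega
      simp only [bStep, hodd, decide_false, Bool.false_eq_true, if_false]
      by_cases hbs : c = '\\'
      · have hsome : ¬ (some c = some '{') := by simp [hbs]
        rw [if_neg hsome, aLoop_append cs c cs.length le_rfl]
        simp [hbs]
        omega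
      · by_cases hc : c = '{'
        · simp [hc, heven]
        · have hsome : ¬ (some c = some '{') := by simpa using hc
          rw [if_neg hsome, aLoop_append cs c cs.length le_rfl]
          simp [hbs, hc]

-- ===== VERDICT (by name: the statement is the Claim_ definition above) =====
theorem find_last_unescaped_brace_spec : Claim_equal_find_last_unescaped_brace := by
  intro text _
  unfold Spec_find_last_unescaped_brace find_last_unescaped_brace find_last_unescaped_brace_alt
  rw [bFold_eq]
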